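-- pv_equiv track=rewrite | github.com/shijian2001/AttrSyn | promptqa_generator/utils/generators/scene_graph_qa.py | subgraph_contain_multiple_same_direction_relations
-- ===== SOURCE A (Python) =====
-- def subgraph_contain_multiple_same_direction_relations(subgraph):
-- 	out_rel = False
-- 	in_rel = False
-- 	for item in subgraph:
-- 		if len(item) == 3:
-- 			if item[2] == 0:
-- 				if out_rel:
-- 					return True
-- 				out_rel = True
-- 			else:
-- 				if in_rel:
-- 					return True
-- 				in_rel = True
-- 	return False
-- ===== SOURCE B (Python) =====
-- def subgraph_contain_multiple_same_direction_relations(subgraph):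
--     outgoing = sum(1 for item in subgraph if len(item) == 3 and item[2] == 0)
--     incoming = sum(1 for item in subgraph if len(item) == 3 and item[2] != 0)
--     return outgoing >= 2 or incoming >= 2
-- ===== Notes on version B (the rewrite author's own statement) =====
-- stated objective: simpler
-- what changed: Replaces the stateful early-exit loop with two boolean flags by two declarative counts of same-direction length-3 relations followed by a single >=2 comparison.
import Mathlib
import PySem

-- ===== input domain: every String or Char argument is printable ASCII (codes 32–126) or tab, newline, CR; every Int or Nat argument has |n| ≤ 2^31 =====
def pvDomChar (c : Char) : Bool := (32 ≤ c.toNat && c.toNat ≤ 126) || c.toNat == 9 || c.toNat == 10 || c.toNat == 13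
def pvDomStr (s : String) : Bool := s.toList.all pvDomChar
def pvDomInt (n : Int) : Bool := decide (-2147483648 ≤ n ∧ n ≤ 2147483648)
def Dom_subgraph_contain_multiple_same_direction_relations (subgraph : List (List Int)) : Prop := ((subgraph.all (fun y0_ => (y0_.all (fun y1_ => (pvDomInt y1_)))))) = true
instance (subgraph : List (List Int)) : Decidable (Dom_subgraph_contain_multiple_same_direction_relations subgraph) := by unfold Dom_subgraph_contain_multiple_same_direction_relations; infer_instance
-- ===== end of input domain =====

-- B replaces A's stateful early-exit loop over two flags by two declarative counts plus one final comparison (objective: simpler decomposition, same behaviour).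


-- ===== PORT A =====
-- the for-loop with flags out_rel / in_rel and the early `return True`; item[2] is in range
-- because item.length = 3, so `(PySem.List.pyGet? item 2).getD 0` is exact (the default is never used)
def pvLoopA : Bool → Bool → List (List Int) → Bool
  | _, _, [] => false
  | out_rel, in_rel, item :: rest =>
    if item.length = 3 then
      if (PySem.List.pyGet? item 2).getD 0 = 0 then
        if out_rel then true else pvLoopA true in_rel rest
      else
        if in_rel then true else pvLoopA out_rel true rest
    else pvLoopA out_rel in_rel rest


def subgraph_contain_multiple_same_direction_relations (subgraph : List (List Int)) : Bool :=
  pvLoopA false false subgraph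

-- ===== PORT B =====
-- the two generator-expression sums `sum(1 for item in subgraph if ...)` become List.countP
def subgraph_contain_multiple_same_direction_relations_alt (subgraph : List (List Int)) : Bool :=
  let outgoing := subgraph.countP (fun item => item.length == 3 && (PySem.List.pyGet? item 2).getD 0 == 0)
  let incoming := subgraph.countP (fun item => item.length == 3 && !((PySem.List.pyGet? item 2).getD 0 == 0))
  outgoing ≥ 2 || incoming ≥ 2

-- ===== PRECONDITION & SPEC =====
def Spec_subgraph_contain_multiple_same_direction_relations (subgraph : List (List Int)) (out : Bool) : Prop := out = subgraph_contain_multiple_same_direction_relations_alt subgraph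
instance (subgraph : List (List Int)) (out : Bool) : Decidable (Spec_subgraph_contain_multiple_same_direction_relations subgraph out) := by unfold Spec_subgraph_contain_multiple_same_direction_relations; infer_instance

-- ===== CLAIM (what is proved, stated in full; the proofs are below) =====
def Claim_equal_subgraph_contain_multiple_same_direction_relations : Prop := ∀ (subgraph : List (List Int)), Dom_subgraph_contain_multiple_same_direction_relations subgraph → Spec_subgraph_contain_multiple_same_direction_relations subgraph (subgraph_contain_multiple_same_direction_relations subgraph)

-- ===== LEMMAS AND PROOFS =====
-- loop invariant for A: with flags o, i pending, the loop succeeds iff one of the two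
-- direction counts of the remaining list, plus the pending flag, reaches 2
theorem pvLoopA_iff (l : List (List Int)) : ∀ (o i : Bool),
    (pvLoopA o i l = true ↔
      2 ≤ (cond o 1 0) + l.countP (fun item => item.length == 3 && (PySem.List.pyGet? item 2).getD 0 == 0) ∨
      2 ≤ (cond i 1 0) + l.countP (fun item => item.length == 3 && !((PySem.List.pyGet? item 2).getD 0 == 0))) := by
  induction l with
  | nil => intro o i; cases o <;> cases i <;> simp [pvLoopA]
  | cons item rest ih =>
    intro o i
    have hEx0 : (∃ a ∈ rest, a.length = 3 ∧ (PySem.List.pyGet? a 2).getD 0 = 0) ↔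
        0 < List.countP (fun item => item.length == 3 && (PySem.List.pyGet? item 2).getD 0 == 0) rest := by
      rw [List.countP_pos_iff]; simp
    have hEx1 : (∃ a ∈ rest, a.length = 3 ∧ ¬(PySem.List.pyGet? a 2).getD 0 = 0) ↔
        0 < List.countP (fun item => item.length == 3 && !((PySem.List.pyGet? item 2).getD 0 == 0)) rest := by
      rw [List.countP_pos_iff]; simp
    by_cases h3 : item.length = 3
    · by_cases hz : (PySem.List.pyGet? item 2).getD 0 = 0
      · cases o <;> cases i <;>
          simp [pvLoopA, if_pos h3, hz, List.countP_cons, ih, -List.countP_pos_iff] <;> (try omega) <;> simp only [hEx0] <;> omega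
      · have hz' : (((PySem.List.pyGet? item 2).getD 0 : Int) == 0) = false := by
          simpa using hz
        have hp0 : ((item.length == 3) && ((PySem.List.pyGet? item 2).getD 0 == 0)) = false := by
          rw [hz', Bool.and_false]
        have hp1 : ((item.length == 3) && !((PySem.List.pyGet? item 2).getD 0 == 0)) = true := by
          rw [hz', h3]; decide
        cases o <;> cases i <;>
          simp [pvLoopA, if_pos h3, hz, hp0, hp1, ih, -List.countP_pos_iff] <;> (try omega) <;> simp only [hEx1] <;> omega
    · have h3' : (item.length == 3) = false := by simp [h3]
      have hp0 : ((item.length == 3) && ((PySem.List.pyGet? item 2).getD 0 == 0)) = false := by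
        rw [h3']; rfl
      have hp1 : ((item.length == 3) && !((PySem.List.pyGet? item 2).getD 0 == 0)) = false := by
        rw [h3']; rfl
      simp [pvLoopA, if_neg h3, hp0, hp1, ih, -List.countP_pos_iff]

-- ===== VERDICT (by name: the statement is the Claim_ definition above) =====
theorem subgraph_contain_multiple_same_direction_relations_spec : Claim_equal_subgraph_contain_multiple_same_direction_relations := by
  intro subgraph _
  show _ = _
  have h := pvLoopA_iff subgraph false false
  simp only [cond_false, Nat.zero_add] at h
  simp only [subgraph_contain_multiple_same_direction_relations,
    subgraph_contain_multiple_same_direction_relations_alt]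
  rw [Bool.eq_iff_iff]
  simp only [Bool.or_eq_true, decide_eq_true_eq, ge_iff_le]
  exact h
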